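-- pv_equiv track=rewrite | github.com/biliyoyo520/paasword | password.py | bits_to_crockford
-- ===== SOURCE A (Python) =====
-- OUTPUT_ALPHABET = "abcdefghjkmnpqrstuvwxyzABCDEFGHJKLMNPQRSTUVWXYZ1234567890!@#"
--
-- def bits_to_crockford(bitstr: str, out_chars: int) -> str:
--     """
--     将比特串映射到用户指定字符表（OUTPUT_ALPHABET）。
--     - 使用每字符所需的最小 bit 数（bits_per_char）进行切分。
--     - 当生成的整数超出字符表时，使用取模（val % n）以利用全部 bits。
--     - 保证 deterministic。
--     """
--     ALPH = OUTPUT_ALPHABET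
--     n = len(ALPH)
--     # 计算每字符需要的 bits
--     bits_per_char = 1
--     while (1 << bits_per_char) < n:
--         bits_per_char += 1
--
--     needed_bits = bits_per_char * out_chars
--     if len(bitstr) < needed_bits:
--         bitstr = bitstr.ljust(needed_bits, "0")
--     else:
--         bitstr = bitstr[:needed_bits]
--
--     chars = []
--     for i in range(0, needed_bits, bits_per_char):
--         val = int(bitstr[i:i+bits_per_char], 2)
--         val = val % n
--         chars.append(ALPH[val])
--     return "".join(chars)
-- ===== SOURCE B (Python) =====
-- OUTPUT_ALPHABET = "abcdefghjkmnpqrstuvwxyzABCDEFGHJKLMNPQRSTUVWXYZ1234567890!@#"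
--
-- def bits_to_crockford(bitstr: str, out_chars: int) -> str:
--     n = len(OUTPUT_ALPHABET)
--     bits_per_char = (n - 1).bit_length()
--     if out_chars <= 0:
--         return ""
--     needed_bits = bits_per_char * out_chars
--     s = bitstr[:needed_bits].ljust(needed_bits, "0")
--     full = int(s, 2)
--     mask = (1 << bits_per_char) - 1
--     return "".join(
--         OUTPUT_ALPHABET[((full >> (needed_bits - (i + 1) * bits_per_char)) & mask) % n]
--         for i in range(out_chars)
--     )
-- ===== Notes on version B (the rewrite author's own statement) =====
-- stated objective: alternative
-- what changed: Instead of parsing each fixed-width chunk with a separate substring int(.,2) call inside the loop, B parses the padded bit string once into a single integer and extracts each 6-bit group by shift-and-mask, skipping all parsing when out_chars <= 0.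
-- outside the precondition, e.g. on bits_to_crockford('-11', 3): A returns 'Paa', B returns 'Taa'; on bits_to_crockford('00000_', 3): A raises ValueError, B returns 'aaa'
import Mathlib
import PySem

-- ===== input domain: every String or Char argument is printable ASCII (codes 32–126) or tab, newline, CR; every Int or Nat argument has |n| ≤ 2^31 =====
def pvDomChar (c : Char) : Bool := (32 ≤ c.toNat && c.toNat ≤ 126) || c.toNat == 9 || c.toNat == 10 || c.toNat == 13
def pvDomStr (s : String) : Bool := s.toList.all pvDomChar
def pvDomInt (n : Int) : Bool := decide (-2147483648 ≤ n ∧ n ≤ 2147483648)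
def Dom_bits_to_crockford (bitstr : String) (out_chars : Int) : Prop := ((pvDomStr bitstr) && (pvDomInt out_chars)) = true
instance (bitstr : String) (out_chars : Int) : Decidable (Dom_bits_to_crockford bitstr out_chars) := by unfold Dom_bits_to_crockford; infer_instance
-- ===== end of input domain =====

-- B replaces A's per-chunk substring int(.,2) parsing by one parse of the whole padded
-- bit string followed by shift-and-mask extraction of each 6-bit group (objective: alternative).

-- ===== PORT A =====
def pvAlph : List Char := "abcdefghjkmnpqrstuvwxyzABCDEFGHJKLMNPQRSTUVWXYZ1234567890!@#".toList

-- the 'while (1 << bits_per_char) < n: bits_per_char += 1' loop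
def pvBpcLoop (n b : Nat) : Nat := if 1 <<< b < n then pvBpcLoop n (b+1) else b
termination_by n - 1 <<< b
decreasing_by
  simp only [Nat.one_shiftLeft] at *
  have h2 : 2^b < 2^(b+1) := Nat.pow_lt_pow_succ (by omega)
  omega

-- hand port of int(s, 2), exact on the inputs Pre_ admits (chunks consisting of '0'/'1'
-- digits); 'none' stands for Python's ValueError (empty or non-binary chunk) — those inputs
-- are excluded by Pre_, so the '.getD 0' taken on them in the ports is never reached there.
def pvInt2? (cs : List Char) : Option Nat :=
  if cs.isEmpty then none
  else cs.foldl
    (fun a c => a.bind (fun v =>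
      if c = '0' then some (2*v) else if c = '1' then some (2*v+1) else none))
    (some 0)

def bits_to_crockford (bitstr : String) (out_chars : Int) : String :=
  let ALPH := pvAlph
  let n := ALPH.length
  let bits_per_char := pvBpcLoop n 1
  let needed_bits : Int := (bits_per_char : Int) * out_chars
  let bl0 := bitstr.toList
  -- if len(bitstr) < needed_bits: bitstr = bitstr.ljust(needed_bits, "0") else bitstr = bitstr[:needed_bits]
  let bl := if (bl0.length : Int) < needed_bits
            then bl0 ++ List.replicate (needed_bits - bl0.length).toNat '0'
            else PySem.List.slice bl0 none (some needed_bits)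
  let chars := (PySem.List.pyRange 0 needed_bits (bits_per_char : Int)).foldl
      (fun acc i =>
        let v := (pvInt2? (PySem.List.slice bl (some i) (some (i + (bits_per_char : Int))))).getD 0
        -- ALPH[val % n]: the index is < n, so the default of getD is never used
        acc ++ [ALPH.getD (v % n) ' ']) ([] : List Char)
  String.ofList chars

-- ===== PORT B =====
def bits_to_crockford_alt (bitstr : String) (out_chars : Int) : String :=
  let n := pvAlph.length
  let bits_per_char := PySem.Int.bitLength ((n : Int) - 1)   -- (n - 1).bit_length()
  if out_chars ≤ 0 then "" else
    let oc := out_chars.toNat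
    let needed := bits_per_char * oc
    -- bitstr[:needed_bits].ljust(needed_bits, "0")
    let t := PySem.List.slice bitstr.toList none (some (needed : Int))
    let s := t ++ List.replicate (needed - t.length) '0'
    let full := (pvInt2? s).getD 0   -- int(s, 2); non-binary inputs are excluded by Pre_
    let mask := (1 <<< bits_per_char) - 1
    String.ofList ((List.range oc).map (fun i =>
      pvAlph.getD (((full >>> (needed - (i+1) * bits_per_char)) &&& mask) % n) ' '))

-- ===== PRECONDITION & SPEC =====
-- Pre_ excludes inputs with out_chars > 0 whose consumed prefix contains a character other
-- than '0'/'1': there Python's int() either raises ValueError or, via its underscore /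
-- whitespace / sign extras, yields a chunk-boundary-dependent accidental value.
def Pre_bits_to_crockford (bitstr : String) (out_chars : Int) : Prop :=
  out_chars ≤ 0 ∨ ((bitstr.toList.take (6 * out_chars).toNat).all (fun c => c == '0' || c == '1')) = true
instance (bitstr : String) (out_chars : Int) : Decidable (Pre_bits_to_crockford bitstr out_chars) := by unfold Pre_bits_to_crockford; infer_instance

def pvWitness_bits_to_crockford : String × Int := ("1010110", 2)

def Spec_bits_to_crockford (bitstr : String) (out_chars : Int) (out : String) : Prop := out = bits_to_crockford_alt bitstr out_chars
instance (bitstr : String) (out_chars : Int) (out : String) : Decidable (Spec_bits_to_crockford bitstr out_chars out) := by unfold Spec_bits_to_crockford; infer_instance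

-- ===== CLAIM (what is proved, stated in full; the proofs are below) =====
def Claim_equal_bits_to_crockford : Prop := ∀ (bitstr : String) (out_chars : Int), Dom_bits_to_crockford bitstr out_chars → Pre_bits_to_crockford bitstr out_chars → Spec_bits_to_crockford bitstr out_chars (bits_to_crockford bitstr out_chars)

-- ===== LEMMAS AND PROOFS =====

theorem pvAlph_len : pvAlph.length = 60 := by decide

theorem pvBpcLoop_60 : pvBpcLoop 60 1 = 6 := by
  rw [pvBpcLoop, if_pos (by decide), pvBpcLoop, if_pos (by decide), pvBpcLoop,
      if_pos (by decide), pvBpcLoop, if_pos (by decide), pvBpcLoop, if_pos (by decide),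
      pvBpcLoop, if_neg (by decide)]

-- the value of a binary digit list (most significant first)
def pvBin (cs : List Char) : Nat := cs.foldl (fun a c => 2*a + (if c = '1' then 1 else 0)) 0

theorem pvBin_go (cs : List Char) (a : Nat) :
    cs.foldl (fun a c => 2*a + (if c = '1' then 1 else 0)) a = a * 2^cs.length + pvBin cs := by
  induction cs generalizing a with
  | nil => simp [pvBin]
  | cons c t ih =>
    simp only [List.foldl_cons, List.length_cons]
    rw [ih, show pvBin (c :: t) = (2*0 + if c = '1' then 1 else 0) * 2^t.length + pvBin t
         from by rw [pvBin, List.foldl_cons, ih]]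
    ring

theorem pvBin_lt (cs : List Char) : pvBin cs < 2^cs.length := by
  induction cs with
  | nil => simp [pvBin]
  | cons c t ih =>
    rw [pvBin, List.foldl_cons, pvBin_go]
    simp only [List.length_cons, pow_succ]
    by_cases hc : c = '1' <;> simp [hc] <;> omega

theorem pvBin_append (xs ys : List Char) :
    pvBin (xs ++ ys) = pvBin xs * 2^ys.length + pvBin ys := by
  rw [pvBin, List.foldl_append, ← pvBin, pvBin_go]

theorem pvInt2?_eq_bin (cs : List Char) (hne : cs ≠ [])
    (hb : ∀ c ∈ cs, c = '0' ∨ c = '1') : pvInt2? cs = some (pvBin cs) := by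
  rw [pvInt2?, if_neg (by simpa using hne)]
  suffices h : ∀ (l : List Char), (∀ c ∈ l, c = '0' ∨ c = '1') → ∀ v : Nat,
      l.foldl (fun a c => a.bind (fun v =>
        if c = '0' then some (2*v) else if c = '1' then some (2*v+1) else none)) (some v)
      = some (l.foldl (fun a c => 2*a + (if c = '1' then 1 else 0)) v) by
    exact h cs hb 0
  intro l hl
  induction l with
  | nil => intro v; rfl
  | cons c t ih =>
    intro v
    have hc := hl c (by simp)
    have ht : ∀ c ∈ t, c = '0' ∨ c = '1' := fun x hx => hl x (by simp [hx])
    simp only [List.foldl_cons, Option.bind_some]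
    rcases hc with h0 | h1
    · subst h0; simpa using ih ht (2*v)
    · subst h1; simpa using ih ht (2*v+1)

-- the heart of the equivalence: extracting 6-bit groups of the value of a 6k-digit binary
-- list by shift-and-mod equals the value of the corresponding 6-digit sublist
theorem pvChunks (k : Nat) (L : List Char) (h : L.length = 6*k) :
    ∀ i < k, (pvBin L >>> (6*k - 6*(i+1))) % 64 = pvBin ((L.drop (6*i)).take 6) := by
  induction k generalizing L with
  | zero => intro i hi; omega
  | succ k ih =>
    intro i hi
    have hsplit : L = L.take 6 ++ L.drop 6 := (List.take_append_drop 6 L).symm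
    have hTlen : (L.take 6).length = 6 := by simp; omega
    have hDlen : (L.drop 6).length = 6*k := by simp; omega
    have hval : pvBin L = pvBin (L.take 6) * 2^(6*k) + pvBin (L.drop 6) := by
      conv_lhs => rw [hsplit]
      rw [pvBin_append, hDlen]
    have hDlt : pvBin (L.drop 6) < 2^(6*k) := by
      have := pvBin_lt (L.drop 6); rwa [hDlen] at this
    cases i with
    | zero =>
      have hs : 6*(k+1) - 6*(0+1) = 6*k := by omega
      rw [hs, hval, Nat.shiftRight_eq_div_pow]
      have hdiv : (pvBin (L.take 6) * 2^(6*k) + pvBin (L.drop 6)) / 2^(6*k)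
          = pvBin (L.take 6) := by
        rw [Nat.mul_comm, Nat.mul_add_div (Nat.two_pow_pos _), Nat.div_eq_of_lt hDlt,
            Nat.add_zero]
      rw [hdiv]
      have hTlt : pvBin (L.take 6) < 64 := by
        have := pvBin_lt (L.take 6); rwa [hTlen] at this
      simp [Nat.mod_eq_of_lt hTlt]
    | succ i =>
      have hik : i < k := by omega
      have hs : 6*(k+1) - 6*(i+1+1) = 6*k - 6*(i+1) := by omega
      rw [hs]
      have hsle : 6*k - 6*(i+1) + 6 ≤ 6*k := by omega
      have hdrop : (pvBin L >>> (6*k - 6*(i+1))) % 64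
          = (pvBin (L.drop 6) >>> (6*k - 6*(i+1))) % 64 := by
        rw [hval, Nat.shiftRight_eq_div_pow, Nat.shiftRight_eq_div_pow]
        have hrw : pvBin (L.take 6) * 2^(6*k) + pvBin (L.drop 6)
            = 2^(6*k - 6*(i+1)) * (64 * (pvBin (L.take 6) * 2^(6*k - (6*k - 6*(i+1) + 6))))
              + pvBin (L.drop 6) := by
          have h2 : 2^(6*k) = 2^(6*k - 6*(i+1)) * 64 * 2^(6*k - (6*k - 6*(i+1) + 6)) := by
            rw [show (64:Nat) = 2^6 from rfl, ← pow_add, ← pow_add]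
            congr 1
            omega
          rw [h2]
          ring
        rw [hrw, Nat.mul_add_div (Nat.two_pow_pos _), Nat.mul_add_mod]
      rw [hdrop, ih (L.drop 6) hDlen i hik, List.drop_drop]
      rw [show 6 + 6*i = 6*(i+1) from by omega]

theorem pvPyRange6 (oc : Nat) :
    PySem.List.pyRange 0 (6*(oc:Int)) 6 = (List.range oc).map (fun k : Nat => (6*(k:Int))) := by
  rw [PySem.List.pyRange_of_pos _ _ (by norm_num)]
  rcases Nat.eq_zero_or_pos oc with h | h
  · simp [h]
  · have h0 : (0:Int) < 6*(oc:Int) := by positivity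
    simp only [if_pos h0]
    have he : (6*(oc:Int) - 0 + 6 - 1)/6 = oc := by
      have : (6*(oc:Int) - 0 + 6 - 1) = 5 + (oc:Int) * 6 := by ring
      rw [this, Int.add_mul_ediv_right _ _ (by norm_num)]
      norm_num
    rw [he]
    simp

-- ===== VERDICT (by name: the statement is the Claim_ definition above) =====
theorem bits_to_crockford_spec : Claim_equal_bits_to_crockford := by
  intro bitstr out_chars _ hpre
  unfold Spec_bits_to_crockford bits_to_crockford bits_to_crockford_alt
  simp only [pvAlph_len, pvBpcLoop_60]
  by_cases hoc : out_chars ≤ 0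
  · simp only [if_pos hoc]
    rw [PySem.List.pyRange_of_pos _ _ (by norm_num)]
    rw [if_neg (by push_cast; omega)]
    rw [if_neg (show ¬((0:Int) < (↑(6:Nat)) * out_chars) from by push_cast; omega)]
    simp
  · simp only [if_neg hoc]
    obtain ⟨oc, rfl⟩ : ∃ oc : Nat, out_chars = (oc : Int) :=
      ⟨out_chars.toNat, (Int.toNat_of_nonneg (by omega)).symm⟩
    have hoc1 : 1 ≤ oc := by omega
    rw [show PySem.Int.bitLength (((60:Nat):Int) - 1) = 6 from by decide]
    rw [show (1 <<< 6 - 1 : Nat) = 63 from rfl]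
    simp only [Int.toNat_natCast]
    push_cast
    have hslice : PySem.List.slice bitstr.toList none (some (6 * (oc:Int)))
        = bitstr.toList.take (6*oc) := by
      rw [PySem.List.slice_to bitstr.toList (by positivity)]
      congr 1
    have hPadA : (if ((bitstr.toList.length:Int) < 6 * (oc:Int)) then
          bitstr.toList ++ List.replicate ((6 * (oc:Int) - (bitstr.toList.length:Int)).toNat) '0'
        else PySem.List.slice bitstr.toList none (some (6 * (oc:Int))))
        = bitstr.toList.take (6*oc)
            ++ List.replicate (6*oc - (bitstr.toList.take (6*oc)).length) '0' := by
      by_cases hlen : bitstr.toList.length < 6*oc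
      · rw [if_pos (by exact_mod_cast hlen), List.take_of_length_le (le_of_lt hlen)]
        congr 2
        omega
      · rw [if_neg (by exact_mod_cast hlen), hslice]
        have hl : (bitstr.toList.take (6*oc)).length = 6*oc := by
          rw [List.length_take]; omega
        simp [hl]
    rw [hPadA, hslice]
    set P := bitstr.toList.take (6*oc)
        ++ List.replicate (6*oc - (bitstr.toList.take (6*oc)).length) '0' with hP
    have hPlen : P.length = 6*oc := by
      rw [hP, List.length_append, List.length_take, List.length_replicate]; omega
    have hPbin : ∀ c ∈ P, c = '0' ∨ c = '1' := by
      intro c hc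
      rcases hpre with h | hb
      · exact absurd h hoc
      · have hb' : ∀ x ∈ bitstr.toList.take ((6 * ((oc:Nat):Int)).toNat), x = '0' ∨ x = '1' := by
          simpa using hb
        rw [show ((6 * ((oc:Nat):Int)).toNat) = 6*oc from by omega] at hb'
        rcases List.mem_append.1 hc with h1 | h2
        · exact hb' c h1
        · left; exact List.eq_of_mem_replicate h2
    have hPne : P ≠ [] := by
      intro h; rw [h] at hPlen; simp at hPlen; omega
    rw [pvInt2?_eq_bin P hPne hPbin]
    simp only [Option.getD_some]
    rw [PySem.List.foldl_append_singleton_eq_map, pvPyRange6 oc, List.map_map,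
        List.nil_append]
    apply congrArg
    apply List.map_congr_left
    intro i hi
    have hio : i < oc := List.mem_range.1 hi
    simp only [Function.comp]
    rw [PySem.List.slice_toNat P (by positivity) (by positivity)]
    rw [show ((6:Int) * (i:Int)).toNat = 6*i from by omega]
    rw [show (((6:Int) * (i:Int) + 6).toNat) = 6*i+6 from by omega]
    rw [show 6*i+6 - 6*i = 6 from by omega]
    have hClen : ((P.drop (6*i)).take 6).length = 6 := by
      simp [hPlen]; omega
    have hCne : (P.drop (6*i)).take 6 ≠ [] := by
      intro h; rw [h] at hClen; simp at hClen
    have hCbin : ∀ c ∈ (P.drop (6*i)).take 6, c = '0' ∨ c = '1' := by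
      intro c hc
      exact hPbin c (List.mem_of_mem_drop (List.mem_of_mem_take hc))
    rw [pvInt2?_eq_bin _ hCne hCbin]
    simp only [Option.getD_some]
    rw [show (i+1)*6 = 6*(i+1) from by ring]
    rw [show pvBin P >>> (6*oc - 6*(i+1)) &&& 63 = (pvBin P >>> (6*oc - 6*(i+1))) % 64
        from by simpa using Nat.and_two_pow_sub_one_eq_mod (pvBin P >>> (6*oc - 6*(i+1))) 6]
    rw [pvChunks oc P hPlen i hio]
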